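-- pv_equiv track=rewrite | github.com/cobriensr/aws-trade-automation | src/lambda2/main.py | extract_base_symbol
-- ===== SOURCE A (Python) =====
-- def extract_base_symbol(symbol):
--     """
--     Extract base symbol from a futures contract symbol.
--
--     Args:
--         symbol (str): Futures contract symbol (e.g., 'MESH5', 'ESH5', 'ZNH5')
--
--     Returns:
--         str: Base symbol without expiration (e.g., 'MES', 'ES', 'ZN')
--     """
--     # Remove any spaces and anything after them (for options symbols like 'E3DZ4 P4800')
--     symbol = symbol.split()[0]
--
--     # Specific mappings for known products
--     if symbol.startswith(
--         ("MES", "MNQ", "M2K", "MGC", "MBT", "MET", "MCL", "MYM")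
--     ):  # Micro products
--         return symbol[:3]
--     elif symbol.startswith("6"):  # Currency futures
--         return symbol[:2]
--     elif symbol.startswith(
--         ("ZN", "ZB", "ZF", "ZT", "ZC", "ZS", "ZQ", "ZW", "ZL", "ZM")
--     ):  # Z- products
--         return (
--             symbol[:2] if not symbol.startswith("ZM") else "ZM"
--         )  # Special handling for ZM
--     elif symbol.startswith(
--         (
--             "ES",
--             "NQ",
--             "NG",
--             "CL",
--             "GC",
--             "SI",
--             "HG",
--             "TN",
--             "UB",
--             "YM",
--             "KC",
--             "KE",
--             "RB",
--             "PL",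
--         )
--     ):  # Common two-letter products
--         return symbol[:2]
--     elif symbol.startswith(("RTY", "SR3", "SR1")):  # Three-letter products
--         if symbol.startswith("SR"):  # Special handling for SR products
--             return "SR3" if symbol.startswith("SR3") else "SR1"
--         return symbol[:3]
--     else:
--         # Find where the expiration month starts
--         for i, char in enumerate(symbol):
--             if char.isdigit() or char in [
--                 "F",
--                 "G",
--                 "H",
--                 "J",
--                 "K",
--                 "M",
--                 "N",
--                 "Q",
--                 "U",
--                 "V",
--                 "X",
--                 "Z",
--             ]:
--                 if i > 0:  # Make sure we don't return empty string
--                     return symbol[:i]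
--         # If no clear break found, default to first two characters
--         return symbol[:2]
-- ===== SOURCE B (Python) =====
-- _MONTHS = set("FGHJKMNQUVXZ")
--
-- # ordered prefix table: (prefixes, length of base symbol)
-- _TABLE = [
--     (("MES", "MNQ", "M2K", "MGC", "MBT", "MET", "MCL", "MYM"), 3),
--     (("6",), 2),
--     (("ZN", "ZB", "ZF", "ZT", "ZC", "ZS", "ZQ", "ZW", "ZL", "ZM"), 2),
--     (("ES", "NQ", "NG", "CL", "GC", "SI", "HG", "TN", "UB", "YM",
--       "KC", "KE", "RB", "PL"), 2),
--     (("RTY", "SR3", "SR1"), 3),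
-- ]
--
--
-- def extract_base_symbol(symbol):
--     sym = symbol.split()[0]
--     for prefixes, n in _TABLE:
--         if sym.startswith(prefixes):
--             return sym[:n]
--     # fallback: cut before the first digit / month letter (never at index 0)
--     for i in range(1, len(sym)):
--         c = sym[i]
--         if c.isdigit() or c in _MONTHS:
--             return sym[:i]
--     return sym[:2]
-- ===== Notes on version B (the rewrite author's own statement) =====
-- stated objective: simpler
-- what changed: Replaces the hard-coded five-branch if/elif chain (with its redundant ZM and SR3/SR1 special cases) by a single loop over an ordered (prefixes, slice-length) table, and replaces the enumerate fallback with i>0 guard by an index loop from 1 with a set-membership month-letter test.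
import Mathlib
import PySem

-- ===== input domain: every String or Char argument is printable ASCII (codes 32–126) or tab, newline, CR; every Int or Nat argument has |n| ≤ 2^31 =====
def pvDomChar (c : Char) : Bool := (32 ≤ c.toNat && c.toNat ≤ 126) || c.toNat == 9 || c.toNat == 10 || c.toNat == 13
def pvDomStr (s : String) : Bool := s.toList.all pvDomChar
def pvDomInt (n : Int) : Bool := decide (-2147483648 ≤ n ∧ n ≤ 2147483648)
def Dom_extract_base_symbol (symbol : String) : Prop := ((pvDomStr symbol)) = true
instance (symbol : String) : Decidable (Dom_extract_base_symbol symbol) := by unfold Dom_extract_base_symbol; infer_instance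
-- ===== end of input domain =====

-- B replaces A's hard-coded if/elif chain by one loop over an ordered (prefixes, length) table;
-- same fallback scan, started at index 1 instead of guarding i > 0. Objective: simpler.

-- ===== PORT A =====

-- the month-letter list of A's fallback loop
def pvMonthList : List Char := ['F', 'G', 'H', 'J', 'K', 'M', 'N', 'Q', 'U', 'V', 'X', 'Z']

-- symbol.startswith((p1, …, pk)) : true iff some listed prefix matches
def pvA_anyPrefix (sym : List Char) (ps : List (List Char)) : Bool :=
  ps.any (fun p => PySem.Chars.startswith sym p)

-- A's 'for i, char in enumerate(symbol): …' fallback; first arg = remaining chars, second = i, third = whole symbol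
def pvA_scan : List Char → Nat → List Char → List Char
  | [], _, sym => PySem.Chars.slice sym none (some 2)
  | c :: rest, i, sym =>
    if (PySem.Chars.isdigit c || decide (c ∈ pvMonthList)) && decide (0 < i) then
      PySem.Chars.slice sym none (some (i : Int))
    else
      pvA_scan rest (i + 1) sym

def extract_base_symbol (symbol : String) : String :=
  -- symbol = symbol.split()[0]  (split()[0] raises on all-whitespace input: excluded by Pre_)
  let sym := (PySem.List.pyGetD (PySem.Str.split₀ symbol) 0 "").toList
  if pvA_anyPrefix sym [['M','E','S'], ['M','N','Q'], ['M','2','K'], ['M','G','C'],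
      ['M','B','T'], ['M','E','T'], ['M','C','L'], ['M','Y','M']] then
    String.ofList (PySem.Chars.slice sym none (some 3))
  else if PySem.Chars.startswith sym ['6'] then
    String.ofList (PySem.Chars.slice sym none (some 2))
  else if pvA_anyPrefix sym [['Z','N'], ['Z','B'], ['Z','F'], ['Z','T'], ['Z','C'],
      ['Z','S'], ['Z','Q'], ['Z','W'], ['Z','L'], ['Z','M']] then
    (if !PySem.Chars.startswith sym ['Z','M'] then
      String.ofList (PySem.Chars.slice sym none (some 2))
    else "ZM")
  else if pvA_anyPrefix sym [['E','S'], ['N','Q'], ['N','G'], ['C','L'], ['G','C'],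
      ['S','I'], ['H','G'], ['T','N'], ['U','B'], ['Y','M'], ['K','C'], ['K','E'],
      ['R','B'], ['P','L']] then
    String.ofList (PySem.Chars.slice sym none (some 2))
  else if pvA_anyPrefix sym [['R','T','Y'], ['S','R','3'], ['S','R','1']] then
    (if PySem.Chars.startswith sym ['S','R'] then
      (if PySem.Chars.startswith sym ['S','R','3'] then "SR3" else "SR1")
    else String.ofList (PySem.Chars.slice sym none (some 3)))
  else
    String.ofList (pvA_scan sym 0 sym)

-- ===== PORT B =====

-- the ordered prefix table _TABLE : entries (prefixes, slice length)
def pvB_table : List (List (List Char) × Nat) :=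
  [([['M','E','S'], ['M','N','Q'], ['M','2','K'], ['M','G','C'],
     ['M','B','T'], ['M','E','T'], ['M','C','L'], ['M','Y','M']], 3),
   ([['6']], 2),
   ([['Z','N'], ['Z','B'], ['Z','F'], ['Z','T'], ['Z','C'],
     ['Z','S'], ['Z','Q'], ['Z','W'], ['Z','L'], ['Z','M']], 2),
   ([['E','S'], ['N','Q'], ['N','G'], ['C','L'], ['G','C'],
     ['S','I'], ['H','G'], ['T','N'], ['U','B'], ['Y','M'], ['K','C'], ['K','E'],
     ['R','B'], ['P','L']], 2),
   ([['R','T','Y'], ['S','R','3'], ['S','R','1']], 3)]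

-- c.isdigit() or c in _MONTHS
def pvB_isBreak (c : Char) : Bool :=
  PySem.Chars.isdigit c || "FGHJKMNQUVXZ".toList.contains c

-- 'for i in range(1, len(sym)): …' of Source B, as an index loop
def pvB_scan (sym : List Char) (i : Nat) : List Char :=
  if h : i < sym.length then
    (if pvB_isBreak sym[i] then sym.take i else pvB_scan sym (i + 1))
  else
    sym.take 2
termination_by sym.length - i

-- the table loop: first matching entry yields sym[:n]
def pvB_lookup (sym : List Char) : List (List (List Char) × Nat) → Option (List Char)
  | [] => none
  | (ps, n) :: rest =>
    if ps.any (fun p => PySem.Chars.startswith sym p) then some (sym.take n)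
    else pvB_lookup sym rest

def extract_base_symbol_alt (symbol : String) : String :=
  let sym := (PySem.List.pyGetD (PySem.Str.split₀ symbol) 0 "").toList
  match pvB_lookup sym pvB_table with
  | some r => String.ofList r
  | none => String.ofList (pvB_scan sym 1)

-- ===== PRECONDITION & SPEC =====
-- A raises IndexError on symbol.split()[0] when the string has no non-whitespace character; Pre_ excludes exactly those.
def Pre_extract_base_symbol (symbol : String) : Prop :=
  symbol.toList.any (fun c => !PySem.Chars.isspace c) = true
instance (symbol : String) : Decidable (Pre_extract_base_symbol symbol) := by
  unfold Pre_extract_base_symbol; infer_instance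

def pvWitness_extract_base_symbol : String := "MESH5"

def Spec_extract_base_symbol (symbol : String) (out : String) : Prop := out = extract_base_symbol_alt symbol
instance (symbol : String) (out : String) : Decidable (Spec_extract_base_symbol symbol out) := by unfold Spec_extract_base_symbol; infer_instance

-- ===== CLAIM (what is proved, stated in full; the proofs are below) =====
def Claim_equal_extract_base_symbol : Prop := ∀ (symbol : String), Dom_extract_base_symbol symbol → Pre_extract_base_symbol symbol → Spec_extract_base_symbol symbol (extract_base_symbol symbol)

-- ===== LEMMAS AND PROOFS =====


theorem pv_scan_eq (sym : List Char) (i : Nat) (hi : 1 ≤ i) :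
    pvA_scan (sym.drop i) i sym = pvB_scan sym i := by
  rw [pvB_scan]
  by_cases h : i < sym.length
  · rw [dif_pos h, List.drop_eq_getElem_cons h, pvA_scan]
    have hb : ((PySem.Chars.isdigit sym[i] || decide (sym[i] ∈ pvMonthList)) && decide (0 < i))
        = pvB_isBreak sym[i] := by
      simp [pvB_isBreak, pvMonthList, Nat.lt_of_lt_of_le Nat.zero_lt_one hi]
    rw [hb]
    cases hcb : pvB_isBreak sym[i] with
    | true => simp [pysem]
    | false => exact pv_scan_eq sym (i + 1) (by omega)
  · rw [dif_neg h, List.drop_eq_nil_of_le (by omega), pvA_scan]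
    simp [pysem]
termination_by sym.length - i
decreasing_by omega

theorem pv_fallback_eq (sym : List Char) : pvA_scan sym 0 sym = pvB_scan sym 1 := by
  cases hs : sym with
  | nil => rw [pvA_scan, pvB_scan]; simp [pysem]
  | cons c rest =>
    rw [pvA_scan]
    have h := pv_scan_eq (c :: rest) 1 (le_refl 1)
    simpa using h


theorem pv_slice2 (sym : List Char) : PySem.Chars.slice sym none (some 2) = sym.take 2 := by
  simp [pysem]

theorem pv_slice3 (sym : List Char) : PySem.Chars.slice sym none (some 3) = sym.take 3 := by
  simp [pysem]

theorem pv_core_eq (sym : List Char) :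
    (if pvA_anyPrefix sym [['M','E','S'], ['M','N','Q'], ['M','2','K'], ['M','G','C'],
        ['M','B','T'], ['M','E','T'], ['M','C','L'], ['M','Y','M']] then
      String.ofList (PySem.Chars.slice sym none (some 3))
    else if PySem.Chars.startswith sym ['6'] then
      String.ofList (PySem.Chars.slice sym none (some 2))
    else if pvA_anyPrefix sym [['Z','N'], ['Z','B'], ['Z','F'], ['Z','T'], ['Z','C'],
        ['Z','S'], ['Z','Q'], ['Z','W'], ['Z','L'], ['Z','M']] then
      (if !PySem.Chars.startswith sym ['Z','M'] then
        String.ofList (PySem.Chars.slice sym none (some 2))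
      else "ZM")
    else if pvA_anyPrefix sym [['E','S'], ['N','Q'], ['N','G'], ['C','L'], ['G','C'],
        ['S','I'], ['H','G'], ['T','N'], ['U','B'], ['Y','M'], ['K','C'], ['K','E'],
        ['R','B'], ['P','L']] then
      String.ofList (PySem.Chars.slice sym none (some 2))
    else if pvA_anyPrefix sym [['R','T','Y'], ['S','R','3'], ['S','R','1']] then
      (if PySem.Chars.startswith sym ['S','R'] then
        (if PySem.Chars.startswith sym ['S','R','3'] then "SR3" else "SR1")
      else String.ofList (PySem.Chars.slice sym none (some 3)))
    else
      String.ofList (pvA_scan sym 0 sym)) =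
    (match pvB_lookup sym pvB_table with
    | some r => String.ofList r
    | none => String.ofList (pvB_scan sym 1)) := by
  simp only [pvB_lookup, pvB_table, pvA_anyPrefix, List.any_cons, List.any_nil, Bool.or_false]
  split_ifs with h1 h2 h3 hzm h4 h5 hsr hsr3
  · rw [pv_slice3]
  · rw [pv_slice2]
  · rw [pv_slice2]
  · -- symbol starts with "ZM": take 2 is exactly "ZM"
    rw [Bool.not_eq_true', Bool.not_eq_false] at hzm
    rw [PySem.Chars.startswith_iff] at hzm
    obtain ⟨t, rfl⟩ := hzm
    rfl
  · rw [pv_slice2]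
  · -- starts with "SR3"
    rw [PySem.Chars.startswith_iff] at hsr3
    obtain ⟨t, rfl⟩ := hsr3
    rfl
  · -- starts with "SR" but not "SR3": must start with "SR1"
    rw [PySem.Chars.startswith_iff] at hsr
    rw [Bool.or_eq_true, Bool.or_eq_true] at h5
    have h51 : ['S', 'R', '1'] <+: sym := by
      rcases h5 with h5 | h5 | h5
      · rw [PySem.Chars.startswith_iff] at h5
        rcases List.prefix_or_prefix_of_prefix h5 hsr with h | h <;>
          exact absurd h (by decide)
      · exact absurd h5 hsr3
      · rw [PySem.Chars.startswith_iff] at h5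
        exact h5
    have ht : List.take 3 sym = ['S', 'R', '1'] := by
      obtain ⟨u, rfl⟩ := h51; rfl
    rw [ht]
  · rw [pv_slice3]
  · rw [pv_fallback_eq]


-- ===== VERDICT (by name: the statement is the Claim_ definition above) =====
theorem extract_base_symbol_spec : Claim_equal_extract_base_symbol := by
  intro symbol _ _
  unfold Spec_extract_base_symbol extract_base_symbol extract_base_symbol_alt
  exact pv_core_eq _
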